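-- pv_equiv track=rewrite | github.com/SporkSticks/Advent-of-Code-2020 | 2015/Day1.py | final_floor
-- ===== SOURCE A (Python) =====
-- def final_floor(instructions):
--     floor = 0
--     for char in instructions:
--         if char == '(':
--             floor += 1
--         else:
--             floor -= 1
--
--     return floor
-- ===== SOURCE B (Python) =====
-- def final_floor(instructions):
--     # closed form: every '(' is +1, every other char is -1,
--     # so net = ups - (len - ups) = 2*ups - len
--     ups = instructions.count('(')
--     return 2 * ups - len(instructions)
-- ===== Notes on version B (the rewrite author's own statement) =====
-- stated objective: simpler
-- what changed: Replaced the per-character accumulation loop with a closed form: 2*count('(') - len, since every non-'(' character contributes -1.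
import Mathlib
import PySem

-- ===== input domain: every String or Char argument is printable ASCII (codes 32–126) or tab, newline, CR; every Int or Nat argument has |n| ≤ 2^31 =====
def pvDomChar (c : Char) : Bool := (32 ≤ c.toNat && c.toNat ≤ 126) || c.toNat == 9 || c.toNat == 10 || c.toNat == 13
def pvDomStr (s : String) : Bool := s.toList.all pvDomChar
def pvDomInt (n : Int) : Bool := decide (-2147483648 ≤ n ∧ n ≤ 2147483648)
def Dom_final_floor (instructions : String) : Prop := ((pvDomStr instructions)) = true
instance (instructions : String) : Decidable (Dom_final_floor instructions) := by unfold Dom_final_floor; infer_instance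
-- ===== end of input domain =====

-- B replaces A's per-character loop with the closed form 2*count('(') - len (simpler).
-- ===== PORT A =====
def final_floor (instructions : String) : Int :=
  instructions.toList.foldl (fun floor char => if char == '(' then floor + 1 else floor - 1) 0

-- ===== PORT B =====
-- B: closed form 2*count('(') - len (simpler; no per-character branch)
def final_floor_alt (instructions : String) : Int :=
  2 * (PySem.Str.count instructions "(" : Int) - PySem.Str.len instructions

-- ===== PRECONDITION & SPEC =====
def Spec_final_floor (instructions : String) (out : Int) : Prop := out = final_floor_alt instructions
instance (instructions : String) (out : Int) : Decidable (Spec_final_floor instructions out) := by unfold Spec_final_floor; infer_instance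

-- ===== CLAIM (what is proved, stated in full; the proofs are below) =====
def Claim_equal_final_floor : Prop := ∀ (instructions : String), Dom_final_floor instructions → Spec_final_floor instructions (final_floor instructions)

-- ===== LEMMAS AND PROOFS =====

-- ===== VERDICT (by name: the statement is the Claim_ definition above) =====
lemma go_singleton (c : Char) (fuel : Nat) : ∀ (l : List Char) (acc : Nat), l.length ≤ fuel →
    PySem.Chars.count.go [c] fuel l acc = acc + l.count c := by
  induction fuel with
  | zero => intro l acc h; rw [List.length_eq_zero_iff.mp (Nat.le_zero.mp h)]; rfl
  | succ n ih =>
    intro l acc h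
    cases l with
    | nil => rfl
    | cons x t =>
      rw [PySem.Chars.count.go]
      by_cases hx : x = c
      · simp [hx, List.isPrefixOf, ih t (acc+1) (by simpa using h)]
        omega
      · have hcx : ¬ c = x := fun h' => hx h'.symm
        have hp : [c].isPrefixOf (x :: t) = false := by
          simp only [List.isPrefixOf, Bool.and_eq_false_iff, beq_eq_false_iff_ne, ne_eq]
          exact Or.inl hcx
        simp only [hp, Bool.false_eq_true, if_false, List.count_cons,
          ih t acc (by simpa using h), beq_iff_eq]
        simp [hx]

lemma count_singleton (l : List Char) (c : Char) : PySem.Chars.count l [c] = l.count c := by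
  simp [PySem.Chars.count, go_singleton c l.length l 0 le_rfl]

lemma foldl_floor (l : List Char) (acc : Int) :
    l.foldl (fun floor char => if char == '(' then floor + 1 else floor - 1) acc
      = acc + 2 * (l.count '(' : Int) - l.length := by
  induction l generalizing acc with
  | nil => simp
  | cons x xs ih =>
    rw [List.foldl_cons, ih, List.count_cons, List.length_cons]
    by_cases h : x = '(' <;> simp [h] <;> ring

theorem final_floor_spec : Claim_equal_final_floor := by
  intro s _
  unfold Spec_final_floor final_floor final_floor_alt
  rw [foldl_floor, PySem.Str.count_eq, PySem.Str.len_eq,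
    show "(".toList = ['('] from rfl, count_singleton]
  simp
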